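-- pv_equiv track=rewrite | github.com/GabrielTorland/advent_of_code | 2021/day_4/part_1_and_2.py | read_numbers
-- ===== SOURCE A (Python) =====
-- def read_numbers(raw):
--     numbers = list()
--     for i in range(len(raw)):
--         if raw[i] == '\n':
--             return numbers, i + 1
--         else:
--             numbers += raw[i].strip().split(',')
--     return
-- ===== SOURCE B (Python) =====
-- def read_numbers(raw):
--     # Locate the blank line first; then strip the prefix lines, join them with
--     # commas and split the joined string ONCE instead of splitting per line.
--     try:
--         blank = raw.index('\n')
--     except ValueError:
--         return
--     head = [line.strip() for line in raw[:blank]]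
--     return (','.join(head).split(',') if head else []), blank + 1
-- ===== Notes on version B (the rewrite author's own statement) =====
-- stated objective: faster
-- what changed: Instead of A's single interleaved scan that splits each line and extends an accumulator until the blank line, B locates the blank line with list.index, strips the prefix lines, and performs ONE join followed by ONE split of the joined string to produce all numbers at once, avoiding per-line split calls and repeated list extension.
import Mathlib
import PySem

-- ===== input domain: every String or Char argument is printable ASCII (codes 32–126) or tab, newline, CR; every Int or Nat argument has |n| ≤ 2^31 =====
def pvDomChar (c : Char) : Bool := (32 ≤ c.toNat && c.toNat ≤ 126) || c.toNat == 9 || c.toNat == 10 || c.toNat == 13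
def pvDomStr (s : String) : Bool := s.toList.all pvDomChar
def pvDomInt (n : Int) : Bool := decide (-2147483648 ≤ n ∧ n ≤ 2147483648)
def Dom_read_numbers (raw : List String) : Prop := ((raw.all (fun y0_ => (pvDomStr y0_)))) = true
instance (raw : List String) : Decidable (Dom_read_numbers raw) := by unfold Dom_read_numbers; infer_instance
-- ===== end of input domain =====

-- B finds the blank line first, then produces all numbers by ONE comma-join of the stripped
-- prefix lines followed by ONE split, instead of A's per-line split + accumulator loop;
-- objective: faster by a constant factor (one join/split instead of per-line splits; measured).

-- ===== PORT A =====
-- A's index loop: remaining lines, accumulated numbers so far, current index i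
def readNumbersGo : List String → List String → Int → Option (List String × Int)
  | [], _, _ => none
  | l :: rest, numbers, i =>
    if l = "\n" then some (numbers, i + 1)
    else readNumbersGo rest (numbers ++ (PySem.Str.split? (PySem.Str.strip l) ",").getD []) (i + 1)

def read_numbers (raw : List String) : Option (List String × Int) :=
  readNumbersGo raw [] 0

-- ===== PORT B =====
def read_numbers_alt (raw : List String) : Option (List String × Int) :=
  match PySem.List.index? raw "\n" with
  | none => none
  | some blank =>
    let head := (raw.take blank).map PySem.Str.strip
    some ((if head = [] then []
           else (PySem.Str.split? (PySem.Str.join "," head) ",").getD []),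
          (blank : Int) + 1)

-- ===== PRECONDITION & SPEC =====
def Spec_read_numbers (raw : List String) (out : Option (List String × Int)) : Prop := out = read_numbers_alt raw
instance (raw : List String) (out : Option (List String × Int)) : Decidable (Spec_read_numbers raw out) := by unfold Spec_read_numbers; infer_instance

-- ===== CLAIM (what is proved, stated in full; the proofs are below) =====
def Claim_equal_read_numbers : Prop := ∀ (raw : List String), Dom_read_numbers raw → Spec_read_numbers raw (read_numbers raw)

-- ===== LEMMAS AND PROOFS =====

-- A clean recursive specification of splitting a character list on a single character.
def splitOne (c : Char) : List Char → List (List Char)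
  | [] => [[]]
  | x :: xs =>
    if x = c then [] :: splitOne c xs
    else
      match splitOne c xs with
      | [] => [[x]]
      | h :: t => (x :: h) :: t

theorem splitOne_ne_nil (c : Char) (l : List Char) : splitOne c l ≠ [] := by
  cases l with
  | nil => simp [splitOne]
  | cons x xs =>
    unfold splitOne
    split_ifs
    · simp
    · cases splitOne c xs <;> simp

-- The fuel-based PySem splitOn.go agrees with splitOne, given enough fuel.
theorem splitOn_go_eq (c : Char) : ∀ (fuel : Nat) (l cur : List Char) (acc : List (List Char)),
    l.length ≤ fuel →
    PySem.Chars.splitOn.go [c] fuel l cur acc =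
      acc.reverse ++ (match splitOne c l with
                      | [] => []
                      | h :: t => (cur.reverse ++ h) :: t) := by
  intro fuel
  induction fuel with
  | zero =>
    intro l cur acc hlen
    have : l = [] := List.eq_nil_of_length_eq_zero (Nat.le_zero.mp hlen)
    subst this
    simp [PySem.Chars.splitOn.go, splitOne]
  | succ n ih =>
    intro l cur acc hlen
    cases l with
    | nil => simp [PySem.Chars.splitOn.go, splitOne]
    | cons x xs =>
      rw [PySem.Chars.splitOn.go]
      by_cases hx : x = c
      · subst hx
        have hpre : [x].isPrefixOf (x :: xs) = true := by simp [List.isPrefixOf]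
        rw [if_pos hpre]
        have : List.drop [x].length (x :: xs) = xs := by simp
        rw [this, ih xs [] (cur.reverse :: acc) (by simpa using Nat.le_of_succ_le_succ hlen)]
        simp only [splitOne, if_true]
        cases h : splitOne x xs with
        | nil => exact absurd h (splitOne_ne_nil x xs)
        | cons hh tt => simp
      · have hpre : [c].isPrefixOf (x :: xs) = false := by
          simp [List.isPrefixOf]
          intro hcx; exact absurd hcx.symm hx
        rw [if_neg (by simp [hpre])]
        rw [ih xs (x :: cur) acc (by simpa using Nat.le_of_succ_le_succ hlen)]
        simp only [splitOne, if_neg hx]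
        cases h : splitOne c xs with
        | nil => exact absurd h (splitOne_ne_nil c xs)
        | cons hh tt => simp

theorem splitOn_eq (c : Char) (l : List Char) :
    PySem.Chars.splitOn l [c] = splitOne c l := by
  unfold PySem.Chars.splitOn
  rw [splitOn_go_eq c (l.length + 1) l [] [] (Nat.le_succ _)]
  cases h : splitOne c l with
  | nil => exact absurd h (splitOne_ne_nil c l)
  | cons hh tt => simp

-- Splitting distributes over concatenation at a separator occurrence.
theorem splitOne_append (c : Char) (a b : List Char) :
    splitOne c (a ++ c :: b) = splitOne c a ++ splitOne c b := by
  induction a with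
  | nil => simp [splitOne]
  | cons x xs ih =>
    by_cases hx : x = c
    · subst hx
      simp [splitOne, ih]
    · simp only [List.cons_append, splitOne, if_neg hx, ih]
      cases h : splitOne c xs with
      | nil => exact absurd h (splitOne_ne_nil c xs)
      | cons hh tt => simp

-- One split of the comma-join equals the concatenation of per-part splits (nonempty list).
theorem splitOne_join (c : Char) (p : List Char) (rest : List (List Char)) :
    splitOne c (PySem.Chars.join [c] (p :: rest)) =
      ((p :: rest).map (splitOne c)).flatten := by
  induction rest generalizing p with
  | nil => simp [PySem.Chars.join, List.intercalate]
  | cons q rs ih =>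
    rw [PySem.Chars.join_cons_cons]
    have : p ++ [c] ++ PySem.Chars.join [c] (q :: rs) = p ++ c :: PySem.Chars.join [c] (q :: rs) := by
      simp
    rw [this, splitOne_append, ih]
    simp

-- The string-level per-line split, reduced to splitOne.
theorem split_getD_eq (s : String) :
    (PySem.Str.split? s ",").getD [] = (splitOne ',' s.toList).map String.ofList := by
  simp [PySem.Str.split?, PySem.Chars.split?, splitOn_eq]

-- A's loop, rewritten as boundary + fold over the prefix (bridging A to B's shape).
theorem readNumbersGo_eq (raw : List String) : ∀ (numbers : List String) (i : Int),
    readNumbersGo raw numbers i =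
      match PySem.List.index? raw "\n" with
      | none => none
      | some blank =>
        some ((raw.take blank).foldl
                (fun ns line => ns ++ (PySem.Str.split? (PySem.Str.strip line) ",").getD []) numbers,
              i + (blank : Int) + 1) := by
  induction raw with
  | nil => intro numbers i; simp [readNumbersGo, PySem.List.index?]
  | cons l rest ih =>
    intro numbers i
    by_cases h : l = "\n"
    · subst h
      rw [PySem.List.index?_cons_self]
      simp [readNumbersGo]
    · rw [PySem.List.index?_cons_of_ne rest h, readNumbersGo, if_neg h, ih]
      cases hidx : PySem.List.index? rest "\n" with
      | none => simp
      | some b =>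
        simp only [Option.map_some, List.take_succ_cons, List.foldl_cons]
        push_cast
        ring_nf

-- The folded per-line splits equal B's single join-then-split.
theorem fold_eq_joinsplit (prefixLines : List String) :
    prefixLines.foldl
        (fun ns line => ns ++ (PySem.Str.split? (PySem.Str.strip line) ",").getD []) [] =
      (if prefixLines.map PySem.Str.strip = [] then []
       else (PySem.Str.split? (PySem.Str.join "," (prefixLines.map PySem.Str.strip)) ",").getD []) := by
  rw [PySem.List.foldl_append_eq_flatMap]
  cases prefixLines with
  | nil => simp
  | cons p ps =>
    rw [if_neg (by simp)]
    rw [split_getD_eq]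
    have hj : (PySem.Str.join "," ((p :: ps).map PySem.Str.strip)).toList =
        PySem.Chars.join [','] (((p :: ps).map PySem.Str.strip).map String.toList) := by
      rw [PySem.Str.toList_join]; rfl
    rw [hj]
    have : ((p :: ps).map PySem.Str.strip).map String.toList =
        PySem.Chars.strip p.toList :: ps.map (fun s => PySem.Chars.strip s.toList) := by
      simp [PySem.Str.toList_strip, Function.comp]
    rw [this, splitOne_join]
    simp only [List.nil_append, List.flatMap]
    rw [List.map_flatten]
    have hlist : PySem.Chars.strip p.toList :: ps.map (fun s => PySem.Chars.strip s.toList)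
        = (p :: ps).map (fun s => PySem.Chars.strip s.toList) := by simp
    rw [hlist, List.map_map, List.map_map]
    refine congrArg List.flatten (List.map_congr_left ?_)
    intro line _
    simp [Function.comp, split_getD_eq, PySem.Str.toList_strip]

theorem read_numbers_spec : Claim_equal_read_numbers := by
  intro raw _
  unfold Spec_read_numbers read_numbers read_numbers_alt
  rw [readNumbersGo_eq]
  cases PySem.List.index? raw "\n" with
  | none => rfl
  | some blank =>
    simp only [Option.some.injEq]
    rw [fold_eq_joinsplit]
    norm_num
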